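-- pv_equiv track=rewrite | github.com/J-OneK/YiBao | jyk/excel_decl_pipeline/aligner.py | _nearest_anchor
-- ===== SOURCE A (Python) =====
-- from typing import Dict, List, Optional, Tuple
--
-- def _nearest_anchor(entry: Dict, anchors: List[Tuple[int, int, int]]) -> Tuple[int, int, int]:
--     if not anchors:
--         return entry["sheetIndex"], entry["rowAnchor"], entry["colAnchor"]
--     same_sheet = [a for a in anchors if a[0] == entry["sheetIndex"]]
--     pool = same_sheet or anchors
--     row = entry["rowAnchor"]
--     col = entry["colAnchor"]
--     return min(pool, key=lambda a: (abs(a[1] - row), abs(a[2] - col), a[0], a[1], a[2]))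
-- ===== SOURCE B (Python) =====
-- def _nearest_anchor(entry, anchors):
--     if not anchors:
--         return entry["sheetIndex"], entry["rowAnchor"], entry["colAnchor"]
--     sheet = entry["sheetIndex"]
--     row = entry["rowAnchor"]
--     col = entry["colAnchor"]
--     # Rank every anchor by one composite key (same-sheet anchors sort first via the
--     # leading boolean) and return the best-ranked one; sorted() is stable, so ties
--     # keep list order, exactly like min() over the filtered pool.
--     ranked = sorted(anchors, key=lambda a: (a[0] != sheet, abs(a[1] - row),
--                                             abs(a[2] - col), a[0], a[1], a[2]))
--     return ranked[0]
-- ===== Notes on version B (the rewrite author's own statement) =====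
-- stated objective: alternative
-- what changed: Replaces the same-sheet filter plus min-over-pool scan by ranking: one stable sort of all anchors under a composite key whose leading boolean is a[0] != sheetIndex, returning the first element of the sorted list.
import Mathlib
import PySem

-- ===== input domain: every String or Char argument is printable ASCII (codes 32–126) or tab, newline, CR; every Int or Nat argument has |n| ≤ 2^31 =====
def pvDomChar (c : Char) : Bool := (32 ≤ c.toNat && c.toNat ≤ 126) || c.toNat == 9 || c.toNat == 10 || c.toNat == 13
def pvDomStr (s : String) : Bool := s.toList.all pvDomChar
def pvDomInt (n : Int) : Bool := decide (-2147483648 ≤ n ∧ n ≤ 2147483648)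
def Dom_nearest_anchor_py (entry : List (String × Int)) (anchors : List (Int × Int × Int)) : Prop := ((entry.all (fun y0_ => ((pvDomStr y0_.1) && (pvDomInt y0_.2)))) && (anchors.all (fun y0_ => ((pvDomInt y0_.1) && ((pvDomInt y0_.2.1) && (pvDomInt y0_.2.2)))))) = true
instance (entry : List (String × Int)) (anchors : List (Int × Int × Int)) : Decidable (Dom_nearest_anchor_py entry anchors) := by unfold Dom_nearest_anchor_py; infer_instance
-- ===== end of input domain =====

-- ===== PORT A =====
-- B replaces A's filter-then-fallback pool + min scan by one stable sort of all
-- anchors under a composite key (same-sheet flag first) and taking the head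
-- (objective: alternative — sort-then-head instead of filter-then-min).
-- dict lookup entry[k]: first match in the association list (none = KeyError)
def pvLookup (entry : List (String × Int)) (k : String) : Option Int :=
  (entry.find? (fun kv => kv.1 == k)).map (·.2)

-- Python lexicographic '<' on equal-length int tuples (keys encoded as List Int)
def pvLtKey : List Int → List Int → Bool
  | x :: xs, y :: ys => if x < y then true else if y < x then false else pvLtKey xs ys
  | [], _ :: _ => true
  | _, [] => false

-- Python min(..., key=k): first element with minimal key
def pvMinBy (k : Int × Int × Int → List Int) (b : Int × Int × Int) :
    List (Int × Int × Int) → Int × Int × Int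
  | [] => b
  | x :: xs => pvMinBy k (if pvLtKey (k x) (k b) then x else b) xs

-- A's key: (abs(a[1]-row), abs(a[2]-col), a[0], a[1], a[2])
def pvKeyA (row col : Int) (a : Int × Int × Int) : List Int :=
  [|a.2.1 - row|, |a.2.2 - col|, a.1, a.2.1, a.2.2]

def nearest_anchor_py (entry : List (String × Int)) (anchors : List (Int × Int × Int)) : Int × Int × Int :=
  match anchors with
  | [] => ((pvLookup entry "sheetIndex").getD 0, (pvLookup entry "rowAnchor").getD 0,
           (pvLookup entry "colAnchor").getD 0)   -- Pre_ excludes the KeyError case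
  | a :: rest =>
    let sheet := (pvLookup entry "sheetIndex").getD 0
    let same_sheet := (a :: rest).filter (fun x => x.1 == sheet)
    let row := (pvLookup entry "rowAnchor").getD 0
    let col := (pvLookup entry "colAnchor").getD 0
    match (if same_sheet.isEmpty then a :: rest else same_sheet) with  -- pool = same_sheet or anchors
    | [] => (0, 0, 0)            -- unreachable: pool is nonempty
    | p :: ps => pvMinBy (pvKeyA row col) p ps

-- ===== PORT B =====
-- B's composite key: (a[0] != sheet, abs(a[1]-row), abs(a[2]-col), a[0], a[1], a[2]); False=0, True=1
def pvKeyB (sheet row col : Int) (a : Int × Int × Int) : List Int :=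
  (if a.1 == sheet then 0 else 1) :: pvKeyA row col a

def nearest_anchor_py_alt (entry : List (String × Int)) (anchors : List (Int × Int × Int)) : Int × Int × Int :=
  match anchors with
  | [] => ((pvLookup entry "sheetIndex").getD 0, (pvLookup entry "rowAnchor").getD 0,
           (pvLookup entry "colAnchor").getD 0)
  | a :: rest =>
    let sheet := (pvLookup entry "sheetIndex").getD 0
    let row := (pvLookup entry "rowAnchor").getD 0
    let col := (pvLookup entry "colAnchor").getD 0
    -- ranked = sorted(anchors, key=...); return ranked[0] (nonempty, so head)
    match PySem.List.sorted (a :: rest) (pvKeyB sheet row col) with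
    | [] => (0, 0, 0)            -- unreachable: sorted of a nonempty list
    | h :: _ => h

-- ===== PRECONDITION & SPEC =====
-- Pre_: the three keys exist in the entry dict; otherwise Python A raises KeyError.
def Pre_nearest_anchor_py (entry : List (String × Int)) (anchors : List (Int × Int × Int)) : Prop :=
  (pvLookup entry "sheetIndex").isSome ∧ (pvLookup entry "rowAnchor").isSome ∧
  (pvLookup entry "colAnchor").isSome

instance (entry : List (String × Int)) (anchors : List (Int × Int × Int)) : Decidable (Pre_nearest_anchor_py entry anchors) := by unfold Pre_nearest_anchor_py; infer_instance

def pvWitness_nearest_anchor_py : (List (String × Int)) × (List (Int × Int × Int)) :=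
  ([("sheetIndex", 0), ("rowAnchor", 2), ("colAnchor", 3)], [(0, 1, 1), (1, 2, 3)])

def Spec_nearest_anchor_py (entry : List (String × Int)) (anchors : List (Int × Int × Int)) (out : Int × Int × Int) : Prop := out = nearest_anchor_py_alt entry anchors
instance (entry : List (String × Int)) (anchors : List (Int × Int × Int)) (out : Int × Int × Int) : Decidable (Spec_nearest_anchor_py entry anchors out) := by unfold Spec_nearest_anchor_py; infer_instance

-- ===== CLAIM (what is proved, stated in full; the proofs are below) =====
def Claim_equal_nearest_anchor_py : Prop := ∀ (entry : List (String × Int)) (anchors : List (Int × Int × Int)), Dom_nearest_anchor_py entry anchors → Pre_nearest_anchor_py entry anchors → Spec_nearest_anchor_py entry anchors (nearest_anchor_py entry anchors)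

-- ===== LEMMAS AND PROOFS =====

-- pvLtKey is exactly the lexicographic '<' on List Int
theorem pvLtKey_eq (a b : List Int) : pvLtKey a b = decide (a < b) := by
  induction a generalizing b with
  | nil => cases b <;> simp [pvLtKey]
  | cons x xs ih =>
      cases b with
      | nil => simp [pvLtKey]
      | cons y ys =>
          simp only [pvLtKey, List.cons_lt_cons_iff, ih]
          rcases lt_trichotomy x y with h | h | h <;> by_cases h2 : y < x <;> simp_all <;> omega

-- pvMinBy is the running-minimum fold
theorem pvMinBy_eq_foldl (k : Int × Int × Int → List Int) (l : List (Int × Int × Int)) :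
    ∀ b, pvMinBy k b l = l.foldl (fun b x => if pvLtKey (k x) (k b) then x else b) b := by
  induction l with
  | nil => intro b; rfl
  | cons x xs ih => intro b; simp [pvMinBy, List.foldl, ih]

-- the head of the insertion-sort accumulator evolves exactly like a running minimum
theorem foldl_insertBy_head {α : Type} (before : α → α → Bool) :
    ∀ (xs : List α) (h : α) (t : List α), ∃ t',
      xs.foldl (fun acc x => PySem.List.insertBy before x acc) (h :: t)
        = (xs.foldl (fun b x => if before x b then x else b) h) :: t' := by
  intro xs
  induction xs with
  | nil => intro h t; exact ⟨t, rfl⟩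
  | cons x xs ih =>
      intro h t
      by_cases hb : before x h = true
      · simpa [List.foldl, PySem.List.insertBy, hb] using ih x (h :: t)
      · simpa [List.foldl, PySem.List.insertBy, hb] using ih h (PySem.List.insertBy before x t)

-- head of the stable sort under key = first minimal element (as pvMinBy computes it)
theorem sorted_head_eq_pvMinBy (k : Int × Int × Int → List Int)
    (a : Int × Int × Int) (rest : List (Int × Int × Int)) :
    ∃ t', PySem.List.sorted (a :: rest) k = pvMinBy k a rest :: t' := by
  rw [PySem.List.sorted_eq_foldl_insertBy]
  have h0 : PySem.List.insertBy (fun u v => decide (k u < k v)) a ([] : List (Int × Int × Int))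
      = [a] := rfl
  simp only [List.foldl_cons, h0]
  obtain ⟨t', ht⟩ := foldl_insertBy_head (fun u v => decide (k u < k v)) rest a []
  refine ⟨t', ?_⟩
  rw [ht, pvMinBy_eq_foldl]
  simp only [pvLtKey_eq]

-- Core invariant: folding B's flagged key over the whole list equals folding A's key
-- over the same-sheet sublist, falling back to the whole list when there is none.
theorem pvMinBy_flag (sheet row col : Int) (l : List (Int × Int × Int)) :
    ∀ acc : Int × Int × Int,
    pvMinBy (pvKeyB sheet row col) acc l =
      if acc.1 == sheet then
        pvMinBy (pvKeyA row col) acc (l.filter (fun x => x.1 == sheet))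
      else
        match l.filter (fun x => x.1 == sheet) with
        | [] => pvMinBy (pvKeyA row col) acc l
        | x :: t => pvMinBy (pvKeyA row col) x t := by
  induction l with
  | nil => intro acc; by_cases h : acc.1 == sheet <;> simp [pvMinBy, h]
  | cons y ys ih =>
    intro acc
    by_cases hy : y.1 == sheet <;> by_cases hacc : acc.1 == sheet <;>
      simp only [pvMinBy, pvKeyB, pvLtKey, hy, hacc, if_true,
        List.filter_cons] <;>
      norm_num
    · -- y same sheet, acc same sheet: heads equal, compare on pvKeyA
      rw [ih]
      by_cases hlt : pvLtKey (pvKeyA row col y) (pvKeyA row col acc) = true <;>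
        simp [hlt, hy, hacc]
    · -- y same sheet, acc not: y wins immediately
      rw [ih]; simp [hy]
    · -- y not same sheet, acc same: y skipped
      rw [ih]; simp [hacc]
    · -- neither same sheet: compare on pvKeyA, acc stays off-sheet
      rw [ih]
      by_cases hlt : pvLtKey (pvKeyA row col y) (pvKeyA row col acc) = true <;>
        cases hfe : ys.filter (fun x => x.1 == sheet) <;>
          simp [hlt, hy, hacc]

-- ===== VERDICT (by name: the statement is the Claim_ definition above) =====
theorem nearest_anchor_py_spec : Claim_equal_nearest_anchor_py := by
  intro entry anchors _ _
  unfold Spec_nearest_anchor_py nearest_anchor_py nearest_anchor_py_alt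
  cases anchors with
  | nil => rfl
  | cons a rest =>
    simp only
    obtain ⟨t', ht⟩ := sorted_head_eq_pvMinBy
      (pvKeyB ((pvLookup entry "sheetIndex").getD 0) ((pvLookup entry "rowAnchor").getD 0)
        ((pvLookup entry "colAnchor").getD 0)) a rest
    rw [ht]
    simp only
    rw [pvMinBy_flag]
    by_cases ha : a.1 == (pvLookup entry "sheetIndex").getD 0 <;>
      simp only [List.filter_cons, ha, ite_true]
    · simp
    · cases rest.filter (fun x => x.1 == (pvLookup entry "sheetIndex").getD 0) <;> simp
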